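-- pv_equiv track=rewrite | github.com/proj-lumio/be | app/services/general_chat_agent.py | _simple_entity_extract
-- ===== SOURCE A (Python) =====
-- def _simple_entity_extract(query: str) -> list[str]:
--     """Fallback: extract capitalised multi-word spans."""
--     words = query.split()
--     entities, current = [], []
--     for w in words:
--         if w[0:1].isupper() and len(w) > 1:
--             current.append(w)
--         elif current:
--             entities.append(" ".join(current))
--             current = []
--     if current:
--         entities.append(" ".join(current))
--     return entities[:5]
-- ===== SOURCE B (Python) =====
-- def _simple_entity_extract(query: str) -> list[str]:
--     """Fallback: extract capitalised multi-word spans (run-scanning version)."""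
--     words = query.split()
--     n = len(words)
--     spans = []
--     i = 0
--     while i < n:
--         if words[i][0:1].isupper() and len(words[i]) > 1:
--             j = i + 1
--             while j < n and words[j][0:1].isupper() and len(words[j]) > 1:
--                 j += 1
--             spans.append(" ".join(words[i:j]))
--             i = j
--         else:
--             i += 1
--     return spans[:5]
-- ===== Notes on version B (the rewrite author's own statement) =====
-- stated objective: alternative
-- what changed: Replaced A's single-pass accumulator/flush state machine with an index-based run scanner: an inner loop finds the end of each maximal capitalized run, which is then sliced and joined in one step.
import Mathlib
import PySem

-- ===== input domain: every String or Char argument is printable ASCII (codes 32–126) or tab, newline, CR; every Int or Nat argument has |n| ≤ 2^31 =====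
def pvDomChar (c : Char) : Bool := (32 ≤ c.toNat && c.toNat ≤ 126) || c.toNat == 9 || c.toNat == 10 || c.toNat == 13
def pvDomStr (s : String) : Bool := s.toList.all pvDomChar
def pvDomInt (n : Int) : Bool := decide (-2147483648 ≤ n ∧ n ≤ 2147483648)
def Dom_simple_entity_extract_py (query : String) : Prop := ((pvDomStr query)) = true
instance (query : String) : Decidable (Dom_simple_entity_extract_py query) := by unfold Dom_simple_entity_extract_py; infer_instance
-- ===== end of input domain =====

-- B replaces A's accumulator/flush state machine by an index-based scan that finds each
-- maximal capitalized run with an inner loop (objective: alternative decomposition, same cost).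


-- shared helper: Python's  w[0:1].isupper() and len(w) > 1  (both Pythons use this exact test).
-- pyStrIsupper is str.isupper, exact on the ASCII domain (ASCII cased characters = the letters).
def pyStrIsupper (s : String) : Bool :=
  s.toList.any PySem.Chars.isalpha && s.toList.all (fun c => !PySem.Chars.islower c)

def pvCap (w : String) : Bool :=
  pyStrIsupper (PySem.Str.slice w (some 0) (some 1)) && decide (1 < PySem.Str.len w)

-- ===== PORT A =====
-- the for-loop with state (entities, current), plus the final flush
def loopA : List String → List String → List String → List String
  | [], entities, current =>
      if current ≠ [] then entities ++ [PySem.Str.join " " current] else entities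
  | w :: ws, entities, current =>
      if pvCap w then loopA ws entities (current ++ [w])
      else if current ≠ [] then loopA ws (entities ++ [PySem.Str.join " " current]) []
      else loopA ws entities current

def simple_entity_extract_py (query : String) : List String :=
  let words := PySem.Str.split₀ query
  PySem.List.slice (loopA words [] []) none (some 5)

-- ===== PORT B =====
-- inner while: advance j past the capitalized run (words[j] is in range when read)
def innerB (ws : List String) (n : Nat) (j : Nat) : Nat :=
  if h : j < n ∧ pvCap (ws.getD j "") then innerB ws n (j + 1) else j
termination_by n - j
decreasing_by omega

theorem innerB_le (ws : List String) (n j : Nat) : j ≤ innerB ws n j := by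
  unfold innerB
  split
  · exact le_trans (Nat.le_succ j) (innerB_le ws n (j + 1))
  · exact le_refl j
termination_by n - j
decreasing_by rename_i h; omega

-- outer while over i, collecting spans
def outerB (ws : List String) (n : Nat) (i : Nat) (spans : List String) : List String :=
  if h : i < n then
    if pvCap (ws.getD i "") then
      let j := innerB ws n (i + 1)
      outerB ws n j
        (spans ++ [PySem.Str.join " " (PySem.List.slice ws (some (i : Int)) (some (j : Int)))])
    else outerB ws n (i + 1) spans
  else spans
termination_by n - i
decreasing_by
  · have := innerB_le ws n (i + 1); omega
  · omega

def simple_entity_extract_py_alt (query : String) : List String :=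
  let words := PySem.Str.split₀ query
  PySem.List.slice (outerB words words.length 0 []) none (some 5)

-- ===== PRECONDITION & SPEC =====
def Spec_simple_entity_extract_py (query : String) (out : List String) : Prop := out = simple_entity_extract_py_alt query
instance (query : String) (out : List String) : Decidable (Spec_simple_entity_extract_py query out) := by unfold Spec_simple_entity_extract_py; infer_instance

-- ===== CLAIM (what is proved, stated in full; the proofs are below) =====
def Claim_equal_simple_entity_extract_py : Prop := ∀ (query : String), Dom_simple_entity_extract_py query → Spec_simple_entity_extract_py query (simple_entity_extract_py query)

-- ===== LEMMAS AND PROOFS =====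

-- common spec: the list of joined maximal capitalized runs, with pending run `cur`
def gSpec : List String → List String → List String
  | [], cur => if cur = [] then [] else [PySem.Str.join " " cur]
  | w :: ws, cur =>
      if pvCap w then gSpec ws (cur ++ [w])
      else (if cur = [] then [] else [PySem.Str.join " " cur]) ++ gSpec ws []

theorem loopA_eq_gSpec (ws : List String) :
    ∀ ents cur, loopA ws ents cur = ents ++ gSpec ws cur := by
  induction ws with
  | nil => intro ents cur; simp [loopA, gSpec]; split <;> simp_all
  | cons w ws ih =>
      intro ents cur
      simp only [loopA, gSpec]
      by_cases hc : pvCap w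
      · simp [hc, ih]
      · by_cases h0 : cur = [] <;> simp [hc, h0, ih]

theorem gSpec_pending (ws : List String) :
    ∀ cur, cur ≠ [] →
      gSpec ws cur =
        PySem.Str.join " " (cur ++ ws.takeWhile pvCap) :: gSpec (ws.dropWhile pvCap) [] := by
  induction ws with
  | nil => intro cur h; simp [gSpec, h]
  | cons w ws ih =>
      intro cur h
      by_cases hc : pvCap w
      · simp only [gSpec, hc, if_pos, List.takeWhile_cons_of_pos hc,
          List.dropWhile_cons_of_pos hc]
        rw [ih (cur ++ [w]) (by simp)]
        simp
      · simp [gSpec, hc, h, List.takeWhile_cons_of_neg hc, List.dropWhile_cons_of_neg hc]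

theorem innerB_eq (ws : List String) (j : Nat) (hj : j ≤ ws.length) :
    innerB ws ws.length j = j + ((ws.drop j).takeWhile pvCap).length := by
  unfold innerB
  split
  · rename_i h
    obtain ⟨hlt, hcap⟩ := h
    rw [List.getD_eq_getElem ws "" hlt] at hcap
    rw [List.drop_eq_getElem_cons hlt, List.takeWhile_cons_of_pos hcap]
    rw [innerB_eq ws (j + 1) (by omega)]
    simp; omega
  · rename_i h
    by_cases hlt : j < ws.length
    · have hcap : ¬ pvCap (ws.getD j "") = true := fun hc => h ⟨hlt, hc⟩
      rw [List.getD_eq_getElem ws "" hlt] at hcap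
      rw [List.drop_eq_getElem_cons hlt, List.takeWhile_cons_of_neg (by simpa using hcap)]
      simp
    · have : ws.drop j = [] := List.drop_eq_nil_of_le (by omega)
      simp [this]
termination_by ws.length - j
decreasing_by omega

theorem outerB_eq (ws : List String) (i : Nat) (spans : List String) (hi : i ≤ ws.length) :
    outerB ws ws.length i spans = spans ++ gSpec (ws.drop i) [] := by
  unfold outerB
  split
  · rename_i hlt
    have hdrop : ws.drop i = ws[i] :: ws.drop (i + 1) := List.drop_eq_getElem_cons hlt
    have hsplit : ws.drop (i + 1)
        = (ws.drop (i + 1)).takeWhile pvCap ++ (ws.drop (i + 1)).dropWhile pvCap :=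
      (List.takeWhile_append_dropWhile).symm
    split
    · rename_i hcap
      rw [List.getD_eq_getElem ws "" hlt] at hcap
      have hj : innerB ws ws.length (i + 1)
          = i + 1 + ((ws.drop (i + 1)).takeWhile pvCap).length := innerB_eq ws (i + 1) (by omega)
      set t := ((ws.drop (i + 1)).takeWhile pvCap).length with ht
      have htle : t ≤ ws.length - (i + 1) := by
        have h1 : ((ws.drop (i + 1)).takeWhile pvCap).length ≤ (ws.drop (i + 1)).length :=
          (List.takeWhile_prefix pvCap).length_le
        simp only [List.length_drop] at h1; omega
      rw [hj, outerB_eq ws (i + 1 + t) _ (by omega)]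
      -- the slice ws[i:j] is ws[i] followed by the capitalized run after i
      have hslice : PySem.List.slice ws (some (i : Int)) (some ((i + 1 + t : Nat) : Int))
          = ws[i] :: (ws.drop (i + 1)).takeWhile pvCap := by
        rw [PySem.List.slice_natCast]
        have h1 : i + 1 + t - i = t + 1 := by omega
        rw [h1, hdrop, List.take_succ_cons]
        congr 1
        conv_lhs => rw [hsplit]
        exact List.take_left' ht.symm
      have hrest : ws.drop (i + 1 + t) = (ws.drop (i + 1)).dropWhile pvCap := by
        rw [← List.drop_drop]
        conv_lhs => rw [hsplit]
        exact List.drop_left' ht.symm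
      have hg : gSpec (ws.drop i) [] =
          PySem.Str.join " " (ws[i] :: (ws.drop (i + 1)).takeWhile pvCap)
            :: gSpec ((ws.drop (i + 1)).dropWhile pvCap) [] := by
        rw [hdrop]
        simp only [gSpec, hcap, if_pos, List.nil_append]
        exact gSpec_pending (ws.drop (i + 1)) [ws[i]] (by simp)
      rw [hslice, hrest, hg]
      simp
    · rename_i hcap
      rw [List.getD_eq_getElem ws "" hlt] at hcap
      rw [outerB_eq ws (i + 1) spans (by omega), hdrop]
      simp [gSpec, hcap]
  · rename_i h
    have : ws.drop i = [] := List.drop_eq_nil_of_le (by omega)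
    simp [this, gSpec]
termination_by ws.length - i
decreasing_by
  · have := innerB_le ws ws.length (i + 1); omega
  · omega

-- ===== VERDICT (by name: the statement is the Claim_ definition above) =====
theorem simple_entity_extract_py_spec : Claim_equal_simple_entity_extract_py := by
  intro query _
  unfold Spec_simple_entity_extract_py
  show PySem.List.slice (loopA (PySem.Str.split₀ query) [] []) none (some 5)
      = PySem.List.slice
          (outerB (PySem.Str.split₀ query) (PySem.Str.split₀ query).length 0 []) none (some 5)
  rw [loopA_eq_gSpec, outerB_eq (PySem.Str.split₀ query) 0 [] (by omega)]
  simp
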